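-- pv_equiv track=rewrite | github.com/oflisback/advent-of-code-2022 | src/8/ab.py | get_visible_indices
-- ===== SOURCE A (Python) =====
-- def get_visible_indices(tree_heights):
--     base_height = -1
--     visible_indices = []
--     for i in range(len(tree_heights)):
--         if tree_heights[i] > base_height:
--             visible_indices.append(i)
--             base_height = tree_heights[i]
--     return visible_indices
-- ===== SOURCE B (Python) =====
-- def get_visible_indices(tree_heights):
--     # Two passes: build the prefix-maximum table (floored at -1), then filter.
--     prefix = [-1]
--     m = -1
--     for h in tree_heights:
--         m = max(m, h)
--         prefix.append(m)
--     return [i for i, h in enumerate(tree_heights) if h > prefix[i]]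
-- ===== Notes on version B (the rewrite author's own statement) =====
-- stated objective: alternative
-- what changed: A's single fused scan (running max updated while appending indices) is split into two passes: first build a prefix-maximum table floored at -1, then a separate filtering comprehension selects the indices whose height exceeds the table entry.
import Mathlib
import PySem

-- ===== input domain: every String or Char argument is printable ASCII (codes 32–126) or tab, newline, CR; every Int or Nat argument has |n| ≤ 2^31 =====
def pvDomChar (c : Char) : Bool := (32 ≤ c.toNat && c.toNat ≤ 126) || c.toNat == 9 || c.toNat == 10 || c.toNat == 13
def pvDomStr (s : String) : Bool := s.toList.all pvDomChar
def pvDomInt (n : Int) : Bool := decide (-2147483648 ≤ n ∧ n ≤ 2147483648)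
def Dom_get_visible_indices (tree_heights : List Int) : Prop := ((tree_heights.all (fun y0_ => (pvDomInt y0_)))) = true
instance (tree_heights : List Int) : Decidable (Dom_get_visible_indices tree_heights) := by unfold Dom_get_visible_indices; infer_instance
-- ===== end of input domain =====

-- B rebuilds A's answer from a separately built prefix-maximum table plus a filtering pass
-- (alternative decomposition, same O(n) cost; return value only, no mutation involved).

-- ===== PORT A =====
-- fused scan: state (base_height, visible_indices); tree_heights[i] is in range, so pyGetD is exact
def get_visible_indices (tree_heights : List Int) : List Int :=
  ((PySem.List.pyRange 0 (PySem.List.len tree_heights) 1).foldl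
    (fun (st : Int × List Int) i =>
      if PySem.List.pyGetD tree_heights i 0 > st.1 then
        (PySem.List.pyGetD tree_heights i 0, st.2 ++ [i])
      else st)
    (-1, [])).2

-- ===== PORT B =====
-- pass 1: prefix-maximum table (state = (prefix, m)); pass 2: filtering comprehension over enumerate
def get_visible_indices_alt (tree_heights : List Int) : List Int :=
  let pref :=
    (tree_heights.foldl
      (fun (st : List Int × Int) h => (st.1 ++ [max st.2 h], max st.2 h))
      (([-1] : List Int), (-1 : Int))).1
  ((PySem.List.enumerate tree_heights 0).filter
      (fun p => decide (p.2 > PySem.List.pyGetD pref p.1 0))).map (fun p => p.1)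

-- ===== PRECONDITION & SPEC =====
def Spec_get_visible_indices (tree_heights : List Int) (out : List Int) : Prop := out = get_visible_indices_alt tree_heights
instance (tree_heights : List Int) (out : List Int) : Decidable (Spec_get_visible_indices tree_heights out) := by unfold Spec_get_visible_indices; infer_instance

-- ===== CLAIM (what is proved, stated in full; the proofs are below) =====
def Claim_equal_get_visible_indices : Prop := ∀ (tree_heights : List Int), Dom_get_visible_indices tree_heights → Spec_get_visible_indices tree_heights (get_visible_indices tree_heights)

-- ===== LEMMAS AND PROOFS =====

-- reference recursion: visible indices of ts, numbering from s, running max m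
def pvVis (m s : Int) : List Int → List Int
  | [] => []
  | h :: t => if h > m then s :: pvVis h (s + 1) t else pvVis m (s + 1) t

-- reference prefix-maximum table starting from m
def pvPref (m : Int) : List Int → List Int
  | [] => [m]
  | h :: t => m :: pvPref (max m h) t

theorem pvPref_foldl (ts : List Int) :
    ∀ (acc : List Int) (m : Int),
      (ts.foldl (fun (st : List Int × Int) h => (st.1 ++ [max st.2 h], max st.2 h))
        (acc ++ [m], m)).1 = acc ++ pvPref m ts := by
  induction ts with
  | nil => intro acc m; simp [pvPref]
  | cons h t ih =>
    intro acc m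
    have := ih (acc ++ [m]) (max m h)
    simpa [pvPref, List.append_assoc] using this

theorem pvGetD_cons_succ (x : Int) (l : List Int) (j : Int) (hj : 0 ≤ j) :
    PySem.List.pyGetD (x :: l) (j + 1) 0 = PySem.List.pyGetD l j 0 := by
  have h1 := PySem.List.pyGetD_of_nonneg (x :: l) (i := j + 1) 0 (by omega)
  have h2 := PySem.List.pyGetD_of_nonneg l (i := j) 0 hj
  have h3 : (j + 1).toNat = j.toNat + 1 := by omega
  rw [h1, h2, h3]
  simp [List.getD]

theorem pvGetD_cons_zero (x : Int) (l : List Int) :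
    PySem.List.pyGetD (x :: l) 0 0 = x := by
  have h1 := PySem.List.pyGetD_of_nonneg (x :: l) (i := 0) 0 le_rfl
  rw [h1]
  simp

-- B's filtering pass against pvPref computes pvVis (index into the table is p.1 - s)
theorem pvB_filter (ts : List Int) :
    ∀ (m s : Int), 0 ≤ s →
      ((PySem.List.enumerate ts s).filter
          (fun p => decide (p.2 > PySem.List.pyGetD (pvPref m ts) (p.1 - s) 0))).map (fun p => p.1)
        = pvVis m s ts := by
  induction ts with
  | nil => intro m s _; simp [pvVis, PySem.List.enumerate_nil]
  | cons h t ih =>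
    intro m s hs
    rw [PySem.List.enumerate_cons]
    have hhead : PySem.List.pyGetD (pvPref m (h :: t)) 0 0 = m := by
      rw [pvPref, pvGetD_cons_zero]
    have htail :
        ((PySem.List.enumerate t (s + 1)).filter
            (fun p => decide (p.2 > PySem.List.pyGetD (pvPref m (h :: t)) (p.1 - s) 0)))
          = ((PySem.List.enumerate t (s + 1)).filter
            (fun p => decide (p.2 > PySem.List.pyGetD (pvPref (max m h) t) (p.1 - (s + 1)) 0))) := by
      apply List.filter_congr
      intro p hp
      obtain ⟨k, hk, rfl⟩ := (PySem.List.mem_enumerate_iff t (s + 1) p).mp hp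
      have h1 : (s + 1 + (k : Int)) - s = ((s + 1 + (k : Int)) - (s + 1)) + 1 := by omega
      rw [pvPref, h1, pvGetD_cons_succ]
      omega
    rw [List.filter_cons]
    by_cases hcmp : h > m
    · rw [if_pos (by simpa [hhead] using hcmp)]
      rw [htail]
      simp only [List.map_cons]
      rw [ih (max m h) (s + 1) (by omega)]
      have hmx : max m h = h := by omega
      simp [pvVis, hcmp, hmx]
    · rw [if_neg (by simpa [hhead] using hcmp)]
      rw [htail]
      rw [ih (max m h) (s + 1) (by omega)]
      have hmx : max m h = m := by omega
      simp [pvVis, hcmp, hmx]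

-- A's fused scan computes pvVis
theorem pvA_foldl (ts : List Int) :
    ∀ (m s : Int) (acc : List Int),
      ((PySem.List.enumerate ts s).foldl
          (fun (st : Int × List Int) p =>
            if p.2 > st.1 then (p.2, st.2 ++ [p.1]) else st)
          (m, acc)).2 = acc ++ pvVis m s ts := by
  induction ts with
  | nil => intro m s acc; simp [pvVis, PySem.List.enumerate_nil]
  | cons h t ih =>
    intro m s acc
    rw [PySem.List.enumerate_cons]
    simp only [List.foldl_cons]
    by_cases hcmp : h > m
    · rw [if_pos hcmp, ih h (s + 1) (acc ++ [s])]
      simp [pvVis, hcmp]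
    · rw [if_neg hcmp, ih m (s + 1) acc]
      simp [pvVis, hcmp]

-- ===== VERDICT (by name: the statement is the Claim_ definition above) =====
theorem get_visible_indices_spec : Claim_equal_get_visible_indices := by
  intro ts _
  unfold Spec_get_visible_indices get_visible_indices get_visible_indices_alt
  -- A side: rewrite the index loop as a loop over enumerate, then apply pvA_foldl
  have hA :
      ((PySem.List.pyRange 0 (PySem.List.len ts) 1).foldl
        (fun (st : Int × List Int) i =>
          if PySem.List.pyGetD ts i 0 > st.1 then
            (PySem.List.pyGetD ts i 0, st.2 ++ [i])
          else st)
        (-1, [])).2 = pvVis (-1) 0 ts := by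
    have henum := PySem.List.enumerate_eq_map_pyRange (xs := ts) (d := 0)
    have hmap :
        ((PySem.List.pyRange 0 (PySem.List.len ts) 1).map
            (fun j => (j, PySem.List.pyGetD ts j 0))).foldl
          (fun (st : Int × List Int) p =>
            if p.2 > st.1 then (p.2, st.2 ++ [p.1]) else st)
          (-1, [])
        = (PySem.List.pyRange 0 (PySem.List.len ts) 1).foldl
            (fun (st : Int × List Int) i =>
              if PySem.List.pyGetD ts i 0 > st.1 then
                (PySem.List.pyGetD ts i 0, st.2 ++ [i])
              else st)
            (-1, []) := by
      rw [List.foldl_map]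
    rw [← hmap, ← henum]
    simpa using pvA_foldl ts (-1) 0 []
  rw [hA]
  -- B side: prefix table is pvPref, then the filter pass is pvVis
  have hpref :
      (ts.foldl (fun (st : List Int × Int) h => (st.1 ++ [max st.2 h], max st.2 h))
        (([-1] : List Int), (-1 : Int))).1 = pvPref (-1) ts := by
    simpa using pvPref_foldl ts [] (-1)
  simp only [hpref]
  have hfilt :
      ((PySem.List.enumerate ts 0).filter
          (fun p => decide (p.2 > PySem.List.pyGetD (pvPref (-1) ts) p.1 0)))
        = ((PySem.List.enumerate ts 0).filter
          (fun p => decide (p.2 > PySem.List.pyGetD (pvPref (-1) ts) (p.1 - 0) 0))) := by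
    apply List.filter_congr
    intro p _
    norm_num
  rw [hfilt, pvB_filter ts (-1) 0 le_rfl]
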